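-- pv_equiv track=rewrite | github.com/celpegor216/ps | 프로그래머스/unrated/250136. ［PCCP 기출문제］ 2번 ／ 석유 시추/［PCCP 기출문제］ 2번 ／ 석유 시추.py | solution
-- ===== SOURCE A (Python) =====
-- from collections import deque
--
-- def solution(land):
--     N, M = len(land), len(land[0])
--     used = [[0] * M for _ in range(N)]
--
--     answer = [0] * M
--
--     for n in range(N):
--         for m in range(M):
--             if not used[n][m] and land[n][m]:
--                 used[n][m] = 1
--                 q = deque()
--                 q.append((n, m))
--
--                 cols = set()
--                 cnt = 0
--
--                 while q:
--                     y, x = q.popleft()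
--
--                     cols.add(x)
--                     cnt += 1
--
--                     for dy, dx in ((0, 1), (1, 0), (0, -1), (-1, 0)):
--                         ny, nx = y + dy, x + dx
--                         if 0 <= ny < N and 0 <= nx < M and not used[ny][nx] and land[ny][nx]:
--                             used[ny][nx] = 1
--                             q.append((ny, nx))
--
--                 for col in cols:
--                     answer[col] += cnt
--
--     return max(answer)
-- ===== SOURCE B (Python) =====
-- def solution(land):
--     N, M = len(land), len(land[0])
--     oil = {(y, x) for y in range(N) for x in range(M) if land[y][x]}
--     answer = [0] * M
--     used = set()
--     for y in range(N):
--         for x in range(M):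
--             if (y, x) in oil and (y, x) not in used:
--                 comp = {(y, x)}
--                 for _ in range(N * M):
--                     grown = comp | {(ny, nx)
--                                     for (cy, cx) in comp
--                                     for (ny, nx) in ((cy, cx + 1), (cy + 1, cx), (cy, cx - 1), (cy - 1, cx))
--                                     if (ny, nx) in oil and (ny, nx) not in used}
--                     if grown == comp:
--                         break
--                     comp = grown
--                 used |= comp
--                 cnt = len(comp)
--                 for c in {cx for (cy, cx) in comp}:
--                     answer[c] += cnt
--     return max(answer)
-- ===== Notes on version B (the rewrite author's own statement) =====
-- stated objective: alternative
-- what changed: Each connected component is computed by iterated frontier saturation on coordinate sets (repeatedly unioning in free oil neighbours until a fixpoint) instead of a BFS queue over a mutable visited matrix; columns and size are derived from the finished component set rather than accumulated during traversal.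
-- outside the precondition, e.g. on solution([]): A raises IndexError, B raises IndexError; on solution([[]]): A raises ValueError, B raises ValueError; on solution([[1, 1], [0]]): A raises IndexError, B raises IndexError
import Mathlib
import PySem

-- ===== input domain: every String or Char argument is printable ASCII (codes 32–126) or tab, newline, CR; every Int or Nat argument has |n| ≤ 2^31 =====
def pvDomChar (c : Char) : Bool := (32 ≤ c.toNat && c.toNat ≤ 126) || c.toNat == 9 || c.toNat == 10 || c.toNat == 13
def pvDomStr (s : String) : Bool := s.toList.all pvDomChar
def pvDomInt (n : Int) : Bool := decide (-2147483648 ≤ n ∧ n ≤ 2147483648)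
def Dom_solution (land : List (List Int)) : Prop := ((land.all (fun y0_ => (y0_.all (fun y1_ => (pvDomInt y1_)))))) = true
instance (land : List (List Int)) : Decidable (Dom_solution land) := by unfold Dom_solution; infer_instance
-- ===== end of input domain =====

-- B computes each connected component by iterated frontier saturation on coordinate sets
-- instead of A's BFS queue over a mutable visited matrix (objective: alternative, not faster).

-- shared low-level helper: Python's land[y][x] (both programs index the same way)
def pvGet2 (xss : List (List Int)) (y x : Int) : Int :=
  PySem.List.pyGetD (PySem.List.pyGetD xss y []) x 0

-- ===== PORT A =====
def pvSet2 (xss : List (List Int)) (y x : Int) (v : Int) : List (List Int) :=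
  PySem.List.pySetD xss y (PySem.List.pySetD (PySem.List.pyGetD xss y []) x v)

def solA_dirs : List (Int × Int) := [(0, 1), (1, 0), (0, -1), (-1, 0)]

def solA_step (land : List (List Int)) (N M y x : Int)
    (st : List (List Int) × List (Int × Int)) (d : Int × Int) :
    List (List Int) × List (Int × Int) :=
  let ny := y + d.1
  let nx := x + d.2
  if 0 ≤ ny ∧ ny < N ∧ 0 ≤ nx ∧ nx < M ∧ pvGet2 st.1 ny nx = 0 ∧ pvGet2 land ny nx ≠ 0
  then (pvSet2 st.1 ny nx 1, st.2 ++ [(ny, nx)])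
  else st

def solA_addCols (cnt : Int) (answer : List Int) (cols : PySem.Set Int) : List Int :=
  cols.foldl (fun a c => PySem.List.pySetD a c (PySem.List.pyGetD a c 0 + cnt)) answer

-- the `while q:` loop; the fuel argument only makes the recursion structural
-- (under Pre_ it is proved never to run out: each iteration pops one queue cell)
def solA_bfs (land : List (List Int)) (N M : Int) :
    Nat → List (List Int) → List (Int × Int) → PySem.Set Int → Int →
    List (List Int) × PySem.Set Int × Int
  | 0, used, _, cols, cnt => (used, cols, cnt)
  | _ + 1, used, [], cols, cnt => (used, cols, cnt)
  | fuel + 1, used, (y, x) :: rest, cols, cnt =>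
      let cols' := PySem.Set.add cols x
      let st := solA_dirs.foldl (solA_step land N M y x) (used, rest)
      solA_bfs land N M fuel st.1 st.2 cols' (cnt + 1)

def solA_inner (land : List (List Int)) (N M : Int) (n : Int) :
    List Int → List (List Int) × List Int → List (List Int) × List Int
  | [], st => st
  | m :: ms, st =>
      let st' :=
        if pvGet2 st.1 n m = 0 ∧ pvGet2 land n m ≠ 0 then
          let used1 := pvSet2 st.1 n m 1
          let r := solA_bfs land N M ((N * M).toNat + 1) used1 [(n, m)] PySem.Set.empty 0
          (r.1, solA_addCols r.2.2 st.2 r.2.1)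
        else st
      solA_inner land N M n ms st'

def solA_outer (land : List (List Int)) (N M : Int) :
    List Int → List (List Int) × List Int → List (List Int) × List Int
  | [], st => st
  | n :: ns, st =>
      solA_outer land N M ns (solA_inner land N M n (PySem.List.pyRange 0 M 1) st)

def solution (land : List (List Int)) : Int :=
  let N : Int := land.length
  let M : Int := (PySem.List.pyGetD land 0 []).length
  let used : List (List Int) := List.replicate N.toNat (List.replicate M.toNat 0)
  let answer : List Int := List.replicate M.toNat 0
  let st := solA_outer land N M (PySem.List.pyRange 0 N 1) (used, answer)
  (PySem.List.max? st.2 (fun v => v)).getD 0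

-- ===== PORT B =====
def solB_nbrs (c : Int × Int) : List (Int × Int) :=
  [(c.1, c.2 + 1), (c.1 + 1, c.2), (c.1, c.2 - 1), (c.1 - 1, c.2)]

def solB_oil (land : List (List Int)) (N M : Int) : PySem.Set (Int × Int) :=
  PySem.Set.ofList ((PySem.List.pyRange 0 N 1).flatMap (fun y =>
    ((PySem.List.pyRange 0 M 1).filter (fun x => !(pvGet2 land y x == 0))).map (fun x => (y, x))))

def solB_grow (oil used comp : PySem.Set (Int × Int)) : PySem.Set (Int × Int) :=
  PySem.Set.union comp (PySem.Set.ofList (comp.flatMap (fun c =>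
    (solB_nbrs c).filter (fun p => oil.contains p && !(used.contains p)))))

-- the `for _ in range(N*M): … if grown == comp: break` saturation loop
def solB_sat (oil used : PySem.Set (Int × Int)) :
    Nat → PySem.Set (Int × Int) → PySem.Set (Int × Int)
  | 0, comp => comp
  | k + 1, comp =>
      let g := solB_grow oil used comp
      if PySem.Set.equal g comp then comp else solB_sat oil used k g

def solB_addCols (cnt : Int) (answer : List Int) (cols : PySem.Set Int) : List Int :=
  cols.foldl (fun a c => PySem.List.pySetD a c (PySem.List.pyGetD a c 0 + cnt)) answer

def solB_inner (land : List (List Int)) (N M : Int) (oil : PySem.Set (Int × Int)) (y : Int) :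
    List Int → PySem.Set (Int × Int) × List Int → PySem.Set (Int × Int) × List Int
  | [], st => st
  | x :: xs, st =>
      let st' :=
        if oil.contains (y, x) && !(st.1.contains (y, x)) then
          let comp := solB_sat oil st.1 (N * M).toNat (PySem.Set.ofList [(y, x)])
          let cnt : Int := comp.length
          let cols : PySem.Set Int := PySem.Set.ofList (comp.map Prod.snd)
          (PySem.Set.union st.1 comp, solB_addCols cnt st.2 cols)
        else st
      solB_inner land N M oil y xs st'

def solB_outer (land : List (List Int)) (N M : Int) (oil : PySem.Set (Int × Int)) :
    List Int → PySem.Set (Int × Int) × List Int → PySem.Set (Int × Int) × List Int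
  | [], st => st
  | y :: ys, st =>
      solB_outer land N M oil ys (solB_inner land N M oil y (PySem.List.pyRange 0 M 1) st)

def solution_alt (land : List (List Int)) : Int :=
  let N : Int := land.length
  let M : Int := (PySem.List.pyGetD land 0 []).length
  let oil := solB_oil land N M
  let answer : List Int := List.replicate M.toNat 0
  let st := solB_outer land N M oil (PySem.List.pyRange 0 N 1) (PySem.Set.empty, answer)
  (PySem.List.max? st.2 (fun v => v)).getD 0

-- ===== PRECONDITION & SPEC =====
-- Pre_ excludes exactly the inputs on which A raises: empty land (IndexError on land[0]),
-- an empty first row (max([]) ValueError), and a later row shorter than the first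
-- (IndexError on land[n][m]); A returns normally on every other input.
def Pre_solution (land : List (List Int)) : Prop :=
  land ≠ [] ∧ 0 < (land.headD []).length ∧ ∀ row ∈ land, (land.headD []).length ≤ row.length

instance (land : List (List Int)) : Decidable (Pre_solution land) := by
  unfold Pre_solution; infer_instance

def pvWitness_solution : List (List Int) := [[1, 0], [0, 1]]

def Spec_solution (land : List (List Int)) (out : Int) : Prop := out = solution_alt land
instance (land : List (List Int)) (out : Int) : Decidable (Spec_solution land out) := by
  unfold Spec_solution; infer_instance

-- ===== CLAIM (what is proved, stated in full; the proofs are below) =====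
def Claim_equal_solution : Prop :=
  ∀ (land : List (List Int)), Dom_solution land → Pre_solution land →
    Spec_solution land (solution land)

-- ===== LEMMAS AND PROOFS =====

-- adjacency of grid cells (the four BFS directions)
def pvAdj (a b : Int × Int) : Prop :=
  b = (a.1, a.2 + 1) ∨ b = (a.1 + 1, a.2) ∨ b = (a.1, a.2 - 1) ∨ b = (a.1 - 1, a.2)

def pvInB (N M : Int) (c : Int × Int) : Prop :=
  0 ≤ c.1 ∧ c.1 < N ∧ 0 ≤ c.2 ∧ c.2 < M

-- a cell that is oil and not yet marked in the base matrix u0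
def pvFree (land : List (List Int)) (N M : Int) (u0 : List (List Int)) (c : Int × Int) : Prop :=
  pvInB N M c ∧ pvGet2 land c.1 c.2 ≠ 0 ∧ pvGet2 u0 c.1 c.2 = 0

def pvReach (F : Int × Int → Prop) (s c : Int × Int) : Prop :=
  Relation.ReflTransGen (fun a b => F b ∧ pvAdj a b) s c

def pvShape (N M : Nat) (u : List (List Int)) : Prop :=
  u.length = N ∧ ∀ r ∈ u, r.length = M

def pvCells (N M : Int) : List (Int × Int) :=
  (PySem.List.pyRange 0 N 1).flatMap (fun y => (PySem.List.pyRange 0 M 1).map (fun x => (y, x)))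

def pvZeros (N M : Int) (u : List (List Int)) : Nat :=
  (pvCells N M).countP (fun c => pvGet2 u c.1 c.2 == 0)

theorem mem_pvCells (N M : Int) (c : Int × Int) : c ∈ pvCells N M ↔ pvInB N M c := by
  unfold pvCells pvInB
  simp only [List.mem_flatMap, List.mem_map, PySem.List.mem_pyRange_one]
  constructor
  · rintro ⟨y, ⟨hy0, hyN⟩, x, ⟨hx0, hxM⟩, rfl⟩; exact ⟨hy0, hyN, hx0, hxM⟩
  · rintro ⟨h1, h2, h3, h4⟩; exact ⟨c.1, ⟨h1, h2⟩, c.2, ⟨h3, h4⟩, rfl⟩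

theorem nodup_pvCells (N M : Int) : (pvCells N M).Nodup := by
  unfold pvCells
  refine List.nodup_flatMap.2 ⟨fun y _ => ?_, ?_⟩
  · exact (PySem.List.nodup_pyRange_one 0 M).map
      (fun a b h => by injection h)
  · refine List.Pairwise.imp ?_ (PySem.List.nodup_pyRange_one 0 N)
    intro y y' hne t ht ht'
    simp only [List.mem_map] at ht ht'
    obtain ⟨x, _, rfl⟩ := ht
    obtain ⟨x', _, h⟩ := ht'
    exact hne (congrArg Prod.fst h).symm

theorem length_pvCells (N M : Int) (hN : 0 ≤ N) (hM : 0 ≤ M) :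
    (pvCells N M).length = (N * M).toNat := by
  obtain ⟨n, rfl⟩ := Int.eq_ofNat_of_zero_le hN
  obtain ⟨m, rfl⟩ := Int.eq_ofNat_of_zero_le hM
  unfold pvCells
  rw [List.length_flatMap]
  simp only [List.length_map, PySem.List.length_pyRange_one]
  rw [List.map_const', List.sum_replicate, smul_eq_mul, PySem.List.length_pyRange_one]
  simp only [sub_zero, Int.toNat_natCast]
  rw [← Int.natCast_mul, Int.toNat_natCast]

theorem pvGet2_nonneg (u : List (List Int)) (y x : Int) (hy : 0 ≤ y) (hx : 0 ≤ x) :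
    pvGet2 u y x = (u[y.toNat]?.getD [])[x.toNat]?.getD 0 := by
  unfold pvGet2
  rw [← Int.toNat_of_nonneg hy, ← Int.toNat_of_nonneg hx,
    PySem.List.pyGetD_natCast, PySem.List.pyGetD_natCast]
  simp only [List.getD_eq_getElem?_getD, Int.toNat_natCast]

theorem pvSet2_nonneg (u : List (List Int)) (y x v : Int) (hy : 0 ≤ y) (hx : 0 ≤ x) :
    pvSet2 u y x v = u.set y.toNat ((u[y.toNat]?.getD []).set x.toNat v) := by
  unfold pvSet2
  rw [← Int.toNat_of_nonneg hy, ← Int.toNat_of_nonneg hx,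
    PySem.List.pyGetD_natCast, PySem.List.pySetD_natCast, PySem.List.pySetD_natCast]
  simp only [List.getD_eq_getElem?_getD, Int.toNat_natCast]

theorem pvGet2_set2 (u : List (List Int)) (N M : Nat) (hsh : pvShape N M u)
    (y x v : Int) (hy : 0 ≤ y) (hyN : y < (N : Int)) (hx : 0 ≤ x) (hxM : x < (M : Int))
    (y' x' : Int) (hy' : 0 ≤ y') (hyN' : y' < (N : Int)) (hx' : 0 ≤ x') (hxM' : x' < (M : Int)) :
    pvGet2 (pvSet2 u y x v) y' x' = if y' = y ∧ x' = x then v else pvGet2 u y' x' := by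
  obtain ⟨hlen, hrows⟩ := hsh
  have hrowlen : (u[y.toNat]?.getD []).length = M := by
    rw [List.getElem?_eq_getElem (by omega), Option.getD_some]
    exact hrows _ (List.getElem_mem _)
  rw [pvGet2_nonneg _ _ _ hy' hx', pvGet2_nonneg _ _ _ hy' hx',
    pvSet2_nonneg _ _ _ _ hy hx]
  by_cases hyy : y' = y
  · subst hyy
    rw [List.getElem?_set_self (by omega), Option.getD_some]
    by_cases hxx : x' = x
    · subst hxx
      rw [if_pos ⟨rfl, rfl⟩, List.getElem?_set_self (by omega), Option.getD_some]
    · rw [if_neg (by rintro ⟨-, h⟩; exact hxx h), List.getElem?_set_ne (by omega)]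
  · rw [if_neg (by rintro ⟨h, -⟩; exact hyy h), List.getElem?_set_ne (by omega)]

theorem pvShape_set2 (u : List (List Int)) (N M : Nat) (hsh : pvShape N M u)
    (y x v : Int) (hy : 0 ≤ y) (hyN : y < (N : Int)) (hx : 0 ≤ x) :
    pvShape N M (pvSet2 u y x v) := by
  obtain ⟨hlen, hrows⟩ := hsh
  have hrowlen : (u[y.toNat]?.getD []).length = M := by
    rw [List.getElem?_eq_getElem (by omega), Option.getD_some]
    exact hrows _ (List.getElem_mem _)
  rw [pvSet2_nonneg _ _ _ _ hy hx]
  refine ⟨by simpa using hlen, ?_⟩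
  intro r hr
  rcases List.mem_or_eq_of_mem_set hr with h | rfl
  · exact hrows _ h
  · simpa using hrowlen

theorem pvGet2_zeros (u : List (List Int)) (h : ∀ r ∈ u, ∀ w ∈ r, w = 0) (y x : Int) :
    pvGet2 u y x = 0 := by
  unfold pvGet2 PySem.List.pyGetD
  cases hrow : PySem.List.pyGet? u y with
  | none =>
    simp only [Option.getD_none]
    cases hv : PySem.List.pyGet? ([] : List Int) x with
    | none => simp
    | some w => exact absurd (PySem.List.mem_of_pyGet?_eq_some _ hv) (by simp)
  | some r =>
    have hr := PySem.List.mem_of_pyGet?_eq_some _ hrow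
    cases hv : PySem.List.pyGet? r x with
    | none => simp [hv]
    | some w =>
      have hw := PySem.List.mem_of_pyGet?_eq_some _ hv
      simp [hv, h r hr w hw]

theorem countP_flip {α : Type} [DecidableEq α] (l : List α) (hn : l.Nodup) (a : α) (ha : a ∈ l)
    (p q : α → Bool) (hpa : p a = true) (hqa : q a = false)
    (hrest : ∀ b ∈ l, b ≠ a → q b = p b) :
    l.countP q + 1 = l.countP p := by
  induction l with
  | nil => cases ha
  | cons x t ih =>
    rcases List.mem_cons.1 ha with rfl | hat
    · have hcong : ∀ b ∈ t, q b = p b := by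
        intro b hb
        exact hrest b (List.mem_cons_of_mem _ hb) (fun hba => ((List.nodup_cons.1 hn).1 (hba ▸ hb)))
      rw [List.countP_cons, List.countP_cons, hpa, hqa, List.countP_congr (fun b hb => by rw [hcong b hb])]
      simp
    · have hxa : x ≠ a := fun hxa => (List.nodup_cons.1 hn).1 (hxa ▸ hat)
      rw [List.countP_cons, List.countP_cons, hrest x (List.mem_cons_self) hxa]
      have := ih (List.nodup_cons.1 hn).2 hat (fun b hb hba => hrest b (List.mem_cons_of_mem _ hb) hba)
      omega

theorem pvZeros_flip (u : List (List Int)) (N M : Int) (hN : 0 ≤ N) (hM : 0 ≤ M)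
    (hsh : pvShape N.toNat M.toNat u) (c : Int × Int) (hc : pvInB N M c)
    (h0 : pvGet2 u c.1 c.2 = 0) :
    pvZeros N M (pvSet2 u c.1 c.2 1) + 1 = pvZeros N M u := by
  obtain ⟨h1, h2, h3, h4⟩ := hc
  have hNM : ((N.toNat : Nat) : Int) = N := by omega
  have hMM : ((M.toNat : Nat) : Int) = M := by omega
  unfold pvZeros
  refine countP_flip _ (nodup_pvCells N M) c ((mem_pvCells N M c).2 (show pvInB N M c from ⟨h1, h2, h3, h4⟩)) _ _ ?_ ?_ ?_
  · simpa using h0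
  · have := pvGet2_set2 u N.toNat M.toNat hsh c.1 c.2 1 h1 (by omega) h3 (by omega)
      c.1 c.2 h1 (by omega) h3 (by omega)
    rw [if_pos (⟨rfl, rfl⟩ : c.1 = c.1 ∧ c.2 = c.2)] at this
    simp [this]
  · intro b hb hbc
    obtain ⟨b1, b2, b3, b4⟩ := (mem_pvCells N M b).1 hb
    have := pvGet2_set2 u N.toNat M.toNat hsh c.1 c.2 1 h1 (by omega) h3 (by omega)
      b.1 b.2 b1 (by omega) b3 (by omega)
    rw [if_neg (by
      rintro ⟨e1, e2⟩
      exact hbc (Prod.ext e1 e2))] at this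
    simp [this]

theorem pvZeros_le (u : List (List Int)) (N M : Int) :
    pvZeros N M u ≤ (pvCells N M).length := by
  exact List.countP_le_length

theorem mem_solB_nbrs (c t : Int × Int) : t ∈ solB_nbrs c ↔ pvAdj c t := by
  simp [solB_nbrs, pvAdj]

theorem pvReach_inB {land : List (List Int)} {N M : Int} {u0 : List (List Int)} {s c : Int × Int}
    (hs : pvFree land N M u0 s) (h : pvReach (pvFree land N M u0) s c) : pvInB N M c := by
  induction h with
  | refl => exact hs.1
  | tail _ h2 _ => exact h2.1.1

-- ---- BFS (port A) characterization ----

structure BfsInv (land : List (List Int)) (N M : Int) (u0 : List (List Int))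
    (s : Int × Int) (used : List (List Int)) (q P : List (Int × Int)) : Prop where
  shape : pvShape N.toNat M.toNat used
  mark : ∀ c : Int × Int, pvInB N M c →
    (pvGet2 used c.1 c.2 ≠ 0 ↔ pvGet2 u0 c.1 c.2 ≠ 0 ∨ c ∈ P ++ q)
  nodup : (P ++ q).Nodup
  reach : ∀ c ∈ P ++ q, pvReach (pvFree land N M u0) s c
  closed : ∀ c ∈ P, ∀ d, pvAdj c d → pvFree land N M u0 d → d ∈ P ++ q
  seedMem : s ∈ P ++ q

theorem pvAdj_iff_dirs (a t : Int × Int) :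
    pvAdj a t ↔ ∃ d ∈ solA_dirs, t = (a.1 + d.1, a.2 + d.2) := by
  simp only [solA_dirs, List.mem_cons, List.not_mem_nil, or_false, pvAdj]
  constructor
  · rintro (rfl | rfl | rfl | rfl)
    · exact ⟨(0, 1), Or.inl rfl, by simp⟩
    · exact ⟨(1, 0), Or.inr (Or.inl rfl), by simp⟩
    · exact ⟨(0, -1), Or.inr (Or.inr (Or.inl rfl)), by simp [sub_eq_add_neg]⟩
    · exact ⟨(-1, 0), Or.inr (Or.inr (Or.inr rfl)), by simp [sub_eq_add_neg]⟩
  · rintro ⟨d, (rfl | rfl | rfl | rfl), rfl⟩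
    · exact Or.inl (by simp)
    · exact Or.inr (Or.inl (by simp))
    · exact Or.inr (Or.inr (Or.inl (by simp [sub_eq_add_neg])))
    · exact Or.inr (Or.inr (Or.inr (by simp [sub_eq_add_neg])))

theorem bfs_fold (land : List (List Int)) (N M : Int) (hN : 0 ≤ N) (hM : 0 ≤ M)
    (u0 : List (List Int)) (s : Int × Int) (_hs : pvFree land N M u0 s)
    (y x : Int) (P rest : List (Int × Int)) :
    ∀ (dirs : List (Int × Int)), (∀ d ∈ dirs, pvAdj (y, x) (y + d.1, x + d.2)) →
    ∀ (used : List (List Int)) (newq : List (Int × Int)) (Z : Nat),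
      pvShape N.toNat M.toNat used →
      (∀ c : Int × Int, pvInB N M c →
        (pvGet2 used c.1 c.2 ≠ 0 ↔ pvGet2 u0 c.1 c.2 ≠ 0 ∨ c ∈ (P ++ (y, x) :: rest) ++ newq)) →
      ((P ++ (y, x) :: rest) ++ newq).Nodup →
      (∀ c ∈ (P ++ (y, x) :: rest) ++ newq, pvReach (pvFree land N M u0) s c) →
      pvZeros N M used + newq.length ≤ Z →
      ∃ (used' : List (List Int)) (ext : List (Int × Int)),
        dirs.foldl (solA_step land N M y x) (used, rest ++ newq) = (used', rest ++ (newq ++ ext)) ∧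
        pvShape N.toNat M.toNat used' ∧
        (∀ c : Int × Int, pvInB N M c →
          (pvGet2 used' c.1 c.2 ≠ 0 ↔ pvGet2 u0 c.1 c.2 ≠ 0 ∨ c ∈ (P ++ (y, x) :: rest) ++ (newq ++ ext))) ∧
        ((P ++ (y, x) :: rest) ++ (newq ++ ext)).Nodup ∧
        (∀ c ∈ (P ++ (y, x) :: rest) ++ (newq ++ ext), pvReach (pvFree land N M u0) s c) ∧
        (∀ d ∈ dirs, pvFree land N M u0 (y + d.1, x + d.2) →
          (y + d.1, x + d.2) ∈ (P ++ (y, x) :: rest) ++ (newq ++ ext)) ∧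
        pvZeros N M used' + (newq ++ ext).length ≤ Z := by
  intro dirs
  induction dirs with
  | nil =>
    intro hdirs used newq Z hsh hmark hnd hreach hz
    exact ⟨used, [], by simp, hsh, by simpa using hmark, by simpa using hnd,
      by simpa using hreach, by simp, by simpa using hz⟩
  | cons d dirs ih =>
    intro hdirs used newq Z hsh hmark hnd hreach hz
    rw [List.foldl_cons]
    by_cases hcond : 0 ≤ y + d.1 ∧ y + d.1 < N ∧ 0 ≤ x + d.2 ∧ x + d.2 < M ∧
        pvGet2 used (y + d.1) (x + d.2) = 0 ∧ pvGet2 land (y + d.1) (x + d.2) ≠ 0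
    · have hstep : solA_step land N M y x (used, rest ++ newq) d
          = (pvSet2 used (y + d.1) (x + d.2) 1, rest ++ (newq ++ [(y + d.1, x + d.2)])) := by
        unfold solA_step
        rw [if_pos hcond]
        simp [List.append_assoc]
      rw [hstep]
      obtain ⟨hb1, hb2, hb3, hb4, hz0, hnz⟩ := hcond
      have htinB : pvInB N M (y + d.1, x + d.2) := ⟨hb1, hb2, hb3, hb4⟩
      have htnm := hmark _ htinB
      have hu0 : pvGet2 u0 (y + d.1) (x + d.2) = 0 := by
        by_contra hne
        have := htnm.2 (Or.inl hne)
        exact this hz0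
      have htnotmem : (y + d.1, x + d.2) ∉ (P ++ (y, x) :: rest) ++ newq := by
        intro hmem
        exact (htnm.2 (Or.inr hmem)) hz0
      have htfree : pvFree land N M u0 (y + d.1, x + d.2) := ⟨htinB, hnz, hu0⟩
      have hyx_mem : ((y, x) : Int × Int) ∈ (P ++ (y, x) :: rest) ++ newq := by simp
      have htreach : pvReach (pvFree land N M u0) s (y + d.1, x + d.2) :=
        Relation.ReflTransGen.tail (hreach _ hyx_mem)
          ⟨htfree, hdirs d List.mem_cons_self⟩
      have hNN : ((N.toNat : Nat) : Int) = N := Int.toNat_of_nonneg hN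
      have hMM : ((M.toNat : Nat) : Int) = M := Int.toNat_of_nonneg hM
      obtain ⟨used', ext, heq, hsh', hmark', hnd', hreach', hcov', hz'⟩ :=
        ih (fun e he => hdirs e (List.mem_cons_of_mem _ he))
          (pvSet2 used (y + d.1) (x + d.2) 1) (newq ++ [(y + d.1, x + d.2)]) Z
          (pvShape_set2 used N.toNat M.toNat hsh _ _ 1 hb1 (by omega) hb3)
          (by
            intro c hc
            obtain ⟨c1, c2, c3, c4⟩ := hc
            rw [pvGet2_set2 used N.toNat M.toNat hsh _ _ 1 hb1 (by omega) hb3 (by omega)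
              c.1 c.2 c1 (by omega) c3 (by omega)]
            by_cases hcc : c = (y + d.1, x + d.2)
            · rw [if_pos (by rw [hcc]; exact ⟨rfl, rfl⟩)]
              constructor
              · intro _
                exact Or.inr (by simp [hcc])
              · intro _
                norm_num
            · rw [if_neg (by
                rintro ⟨e1, e2⟩
                exact hcc (Prod.ext e1 e2))]
              rw [hmark c ⟨c1, c2, c3, c4⟩]
              constructor
              · rintro (h | h)
                · exact Or.inl h
                · exact Or.inr (by simp only [← List.append_assoc]; exact List.mem_append_left _ h)
              · rintro (h | h)
                · exact Or.inl h
                · rcases List.mem_append.1 h with h' | h'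
                  · exact Or.inr (List.mem_append.2 (Or.inl h'))
                  · rcases List.mem_append.1 h' with h'' | h''
                    · exact Or.inr (List.mem_append.2 (Or.inr h''))
                    · exact absurd (List.mem_singleton.1 h'') hcc)
          (by
            rw [← List.append_assoc]
            exact List.Nodup.append (by simpa using hnd)
              (by simp)
              (by
                intro a ha hb
                rw [List.mem_singleton.1 hb] at ha
                exact htnotmem ha))
          (by
            intro c hc
            rw [← List.append_assoc] at hc
            rcases List.mem_append.1 hc with h | h
            · exact hreach _ h
            · rw [List.mem_singleton.1 h]
              exact htreach)
          (by
            have hflip := pvZeros_flip used N M hN hM hsh (y + d.1, x + d.2) htinB hz0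
            dsimp only at hflip
            simp only [List.length_append, List.length_singleton]
            omega)
      refine ⟨used', (y + d.1, x + d.2) :: ext, by rw [heq]; simp, hsh', ?_, ?_, ?_, ?_, ?_⟩
      · intro c hc
        rw [hmark' c hc]
        simp [List.append_assoc]
      · simpa [List.append_assoc] using hnd'
      · intro c hc
        exact hreach' c (by simpa [List.append_assoc] using hc)
      · intro e he hfe
        rcases List.mem_cons.1 he with rfl | he'
        · simp [List.append_assoc]
        · have := hcov' e he' hfe
          simpa [List.append_assoc] using this
      · simp only [List.append_assoc] at hz'
        simpa using hz'
    · have hstep : solA_step land N M y x (used, rest ++ newq) d = (used, rest ++ newq) := by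
        unfold solA_step
        rw [if_neg hcond]
      rw [hstep]
      obtain ⟨used', ext, heq, hsh', hmark', hnd', hreach', hcov', hz'⟩ :=
        ih (fun e he => hdirs e (List.mem_cons_of_mem _ he)) used newq Z hsh hmark hnd hreach hz
      refine ⟨used', ext, heq, hsh', hmark', hnd', hreach', ?_, hz'⟩
      intro e he hfe
      rcases List.mem_cons.1 he with rfl | he'
      · obtain ⟨⟨e1, e2, e3, e4⟩, enz, eu0⟩ := hfe
        have hmarked : pvGet2 used (y + e.1) (x + e.2) ≠ 0 :=
          fun hzz => hcond ⟨e1, e2, e3, e4, hzz, enz⟩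
        have := (hmark _ ⟨e1, e2, e3, e4⟩).1 hmarked
        rcases this with h | h
        · exact absurd eu0 h
        · rcases List.mem_append.1 h with h' | h'
          · exact List.mem_append.2 (Or.inl h')
          · exact List.mem_append.2 (Or.inr (List.mem_append.2 (Or.inl h')))
      · exact hcov' e he' hfe

theorem bfs_spec (land : List (List Int)) (N M : Int) (hN : 0 ≤ N) (hM : 0 ≤ M)
    (u0 : List (List Int)) (s : Int × Int) (hs : pvFree land N M u0 s) :
    ∀ fuel (used : List (List Int)) (q P : List (Int × Int)),
      BfsInv land N M u0 s used q P →
      pvZeros N M used + q.length < fuel →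
      ∃ (usedF : List (List Int)) (Pf : List (Int × Int)),
        solA_bfs land N M fuel used q (PySem.Set.ofList (P.map Prod.snd)) (P.length : Int)
          = (usedF, PySem.Set.ofList (Pf.map Prod.snd), (Pf.length : Int)) ∧
        pvShape N.toNat M.toNat usedF ∧
        Pf.Nodup ∧
        (∀ c : Int × Int, c ∈ Pf ↔ pvReach (pvFree land N M u0) s c) ∧
        (∀ c : Int × Int, pvInB N M c →
          (pvGet2 usedF c.1 c.2 ≠ 0 ↔ pvGet2 u0 c.1 c.2 ≠ 0 ∨ c ∈ Pf)) := by
  intro fuel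
  induction fuel with
  | zero => intro used q P hInv hfuel; omega
  | succ fuel ih =>
    intro used q P hInv hfuel
    cases q with
    | nil =>
      refine ⟨used, P, by rw [solA_bfs], hInv.shape, by simpa using hInv.nodup, ?_, ?_⟩
      · intro c
        constructor
        · intro hc
          exact hInv.reach c (by simpa using hc)
        · intro hreach
          induction hreach with
          | refl => simpa using hInv.seedMem
          | @tail b c' h1 h2 ih2 =>
            have := hInv.closed b ih2 c' h2.2 h2.1
            simpa using this
      · intro c hcin
        simpa using hInv.mark c hcin
    | cons c0 rest =>
      obtain ⟨y, x⟩ := c0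
      obtain ⟨used', ext, heq, hsh', hmark', hnd', hreach', hcov', hz'⟩ :=
        bfs_fold land N M hN hM u0 s hs y x P rest solA_dirs
          (fun d hd => (pvAdj_iff_dirs (y, x) _).2 ⟨d, hd, rfl⟩)
          used [] (pvZeros N M used)
          hInv.shape (by simpa using hInv.mark) (by simpa using hInv.nodup)
          (by
            intro c hc
            exact hInv.reach c (by simpa using hc))
          (by simp)
      simp only [List.append_nil, List.nil_append] at heq hmark' hnd' hreach' hcov' hz'
      have hVeq : (P ++ (y, x) :: rest) ++ ext = (P ++ [(y, x)]) ++ (rest ++ ext) := by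
        simp
      rw [hVeq] at hmark' hnd'
      have hInv' : BfsInv land N M u0 s used' (rest ++ ext) (P ++ [(y, x)]) := by
        refine ⟨hsh', hmark', hnd', ?_, ?_, ?_⟩
        · intro c hc
          exact hreach' c (by rw [hVeq]; exact hc)
        · intro c hcP d hadj hfree
          rcases List.mem_append.1 hcP with hcP | hcyx
          · have := hInv.closed c hcP d hadj hfree
            rw [← hVeq]
            exact List.mem_append.2 (Or.inl this)
          · have hcyx' : c = (y, x) := by simpa using hcyx
            obtain ⟨dd, hdd, hdeq⟩ := (pvAdj_iff_dirs c d).1 hadj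
            have hd2 : d = (y + dd.1, x + dd.2) := by rw [hdeq, hcyx']
            rw [← hVeq, hd2]
            exact hcov' dd hdd (hd2 ▸ hfree)
        · rw [← hVeq]
          exact List.mem_append.2 (Or.inl hInv.seedMem)
      obtain ⟨usedF, Pf, heq2, hshF, hndF, hmemF, hmarkF⟩ :=
        ih used' (rest ++ ext) (P ++ [(y, x)]) hInv' (by
          have h1 : pvZeros N M used + ((y, x) :: rest).length < fuel + 1 := hfuel
          simp only [List.length_cons] at h1
          simp only [List.length_append]
          omega)
      refine ⟨usedF, Pf, ?_, hshF, hndF, hmemF, hmarkF⟩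
      rw [solA_bfs]
      rw [heq]
      have hcols : (PySem.Set.ofList (P.map Prod.snd)).add x
          = PySem.Set.ofList ((P ++ [(y, x)]).map Prod.snd) := by
        simp only [List.map_append, List.map_cons, List.map_nil]
        rw [PySem.Set.ofList_append_singleton]
      have hcnt : (P.length : Int) + 1 = (((P ++ [(y, x)]).length : Nat) : Int) := by
        simp
      rw [hcols, hcnt]
      exact heq2

-- ---- saturation (port B) characterization ----

theorem mem_solB_grow (oil used comp : PySem.Set (Int × Int)) (x : Int × Int) :
    x ∈ solB_grow oil used comp ↔
      x ∈ comp ∨ ((oil.contains x && !(used.contains x)) = true ∧ ∃ b ∈ comp, pvAdj b x) := by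
  unfold solB_grow
  rw [PySem.Set.mem_union, PySem.Set.mem_ofList]
  simp only [List.mem_flatMap, List.mem_filter, mem_solB_nbrs]
  constructor
  · rintro (h | ⟨b, hb, hadj, hpred⟩)
    · exact Or.inl h
    · exact Or.inr ⟨hpred, b, hb, hadj⟩
  · rintro (h | ⟨hpred, b, hb, hadj⟩)
    · exact Or.inl h
    · exact Or.inr ⟨b, hb, hadj, hpred⟩

theorem sat_spec (land : List (List Int)) (N M : Int) (u0 : List (List Int))
    (oil used : PySem.Set (Int × Int))
    (hoil : ∀ c : Int × Int, oil.contains c = true ↔ (pvInB N M c ∧ pvGet2 land c.1 c.2 ≠ 0))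
    (hused : ∀ c : Int × Int, used.contains c = true ↔ (pvInB N M c ∧ pvGet2 u0 c.1 c.2 ≠ 0))
    (s : Int × Int) (hs : pvFree land N M u0 s) :
    ∀ fuel (comp : PySem.Set (Int × Int)), comp.Nodup → s ∈ comp →
      (∀ c ∈ comp, pvReach (pvFree land N M u0) s c) →
      (pvCells N M).length + 1 ≤ fuel + comp.length →
      (solB_sat oil used fuel comp).Nodup ∧
      (∀ c : Int × Int, c ∈ solB_sat oil used fuel comp ↔ pvReach (pvFree land N M u0) s c) := by
  have hfree : ∀ c : Int × Int,
      (oil.contains c && !(used.contains c)) = true ↔ pvFree land N M u0 c := by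
    intro c
    rw [Bool.and_eq_true, Bool.not_eq_eq_eq_not, Bool.not_true]
    constructor
    · rintro ⟨h1, h2⟩
      obtain ⟨hin, hnz⟩ := (hoil c).1 h1
      have hnm : ¬ (pvInB N M c ∧ pvGet2 u0 c.1 c.2 ≠ 0) := by
        intro hx
        rw [(hused c).2 hx] at h2
        cases h2
      refine ⟨hin, hnz, ?_⟩
      by_contra hne
      exact hnm ⟨hin, hne⟩
    · rintro ⟨hin, hnz, hz⟩
      refine ⟨(hoil c).2 ⟨hin, hnz⟩, ?_⟩
      cases h : used.contains c
      · rfl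
      · obtain ⟨-, hnzz⟩ := (hused c).1 h
        exact absurd hz hnzz
  have hsub : ∀ (comp : PySem.Set (Int × Int)),
      (∀ c ∈ comp, pvReach (pvFree land N M u0) s c) → comp.Nodup →
      comp.length ≤ (pvCells N M).length := by
    intro comp hr hnd
    have hsubp : comp.Subperm (pvCells N M) := by
      refine List.subperm_of_subset hnd ?_
      intro c hc
      exact (mem_pvCells N M c).2 (pvReach_inB hs (hr c hc))
    exact hsubp.length_le
  intro fuel
  induction fuel with
  | zero =>
    intro comp hnd hsmem hr hfuel
    exact absurd (hsub comp hr hnd) (by omega)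
  | succ k ih =>
    intro comp hnd hsmem hr hfuel
    rw [solB_sat]
    by_cases heq : PySem.Set.equal (solB_grow oil used comp) comp = true
    · rw [if_pos heq]
      have hcl := (PySem.Set.equal_iff _ _).1 heq
      refine ⟨hnd, ?_⟩
      intro c
      constructor
      · exact hr c
      · intro hreach
        induction hreach with
        | refl => exact hsmem
        | @tail b c' h1 h2 ih2 =>
          exact (hcl _).1 ((mem_solB_grow oil used comp _).2
            (Or.inr ⟨(hfree _).2 h2.1, _, ih2, h2.2⟩))
    · rw [if_neg heq]
      have hcsub : comp ⊆ solB_grow oil used comp := by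
        intro c hc
        exact (mem_solB_grow oil used comp c).2 (Or.inl hc)
      have hndg : (solB_grow oil used comp).Nodup := PySem.Set.nodup_union _ _ hnd
      have hlt : comp.length < (solB_grow oil used comp).length := by
        have hsp : comp.Subperm (solB_grow oil used comp) :=
          List.subperm_of_subset hnd hcsub
        rcases Nat.lt_or_ge comp.length (solB_grow oil used comp).length with h | h
        · exact h
        · exfalso
          apply heq
          rw [PySem.Set.equal_iff]
          intro x
          exact (((List.perm_ext_iff_of_nodup hnd hndg).1 (hsp.perm_of_length_le h)) x).symm
      refine ih (solB_grow oil used comp) hndg (hcsub hsmem) ?_ ?_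
      · intro c hc
        rcases (mem_solB_grow oil used comp c).1 hc with h | ⟨hpred, b, hb, hadj⟩
        · exact hr c h
        · exact Relation.ReflTransGen.tail (hr b hb) ⟨(hfree c).1 hpred, hadj⟩
      · have := hsub comp hr hnd
        omega

theorem oil_contains (land : List (List Int)) (N M : Int) (c : Int × Int) :
    (solB_oil land N M).contains c = true ↔ (pvInB N M c ∧ pvGet2 land c.1 c.2 ≠ 0) := by
  rw [PySem.Set.contains_iff]
  unfold solB_oil
  rw [PySem.Set.mem_ofList]
  simp only [List.mem_flatMap, List.mem_map, List.mem_filter, PySem.List.mem_pyRange_one,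
    Bool.not_eq_eq_eq_not, Bool.not_true, beq_eq_false_iff_ne, ne_eq, pvInB]
  constructor
  · rintro ⟨y, ⟨hy0, hyN⟩, x, ⟨⟨hx0, hxM⟩, hnz⟩, rfl⟩
    exact ⟨⟨hy0, hyN, hx0, hxM⟩, hnz⟩
  · rintro ⟨⟨h1, h2, h3, h4⟩, hnz⟩
    exact ⟨c.1, ⟨h1, h2⟩, c.2, ⟨⟨h3, h4⟩, hnz⟩, rfl⟩

-- ---- answer update ----

theorem addCols_spec (cnt : Int) :
    ∀ (cols : List Int) (answer : List Int),
      (∀ c ∈ cols, 0 ≤ c ∧ c < (answer.length : Int)) → cols.Nodup →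
      (solA_addCols cnt answer cols).length = answer.length ∧
      ∀ j : Nat, j < answer.length →
        (solA_addCols cnt answer cols).getD j 0
          = answer.getD j 0 + (if (j : Int) ∈ cols then cnt else 0) := by
  intro cols
  induction cols with
  | nil =>
    intro answer hb hnd
    refine ⟨rfl, ?_⟩
    intro j hj
    simp [solA_addCols]
  | cons c cs ih =>
    intro answer hb hnd
    have hc := hb c List.mem_cons_self
    have hstep : solA_addCols cnt answer (c :: cs)
        = solA_addCols cnt (answer.set c.toNat (answer.getD c.toNat 0 + cnt)) cs := by
      unfold solA_addCols
      rw [List.foldl_cons, PySem.List.pySetD_of_nonneg _ _ hc.1,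
        ← Int.toNat_of_nonneg hc.1, PySem.List.pyGetD_natCast]
      simp only [Int.toNat_natCast]
    have hb' : ∀ d ∈ cs, 0 ≤ d ∧ d < ((answer.set c.toNat (answer.getD c.toNat 0 + cnt)).length : Int) := by
      intro d hd
      have := hb d (List.mem_cons_of_mem _ hd)
      simpa using this
    obtain ⟨ihlen, ihval⟩ := ih (answer.set c.toNat (answer.getD c.toNat 0 + cnt)) hb'
      (List.nodup_cons.1 hnd).2
    rw [hstep]
    constructor
    · rw [ihlen, List.length_set]
    · intro j hj
      rw [ihval j (by simpa using hj)]
      have hgd : (answer.set c.toNat (answer.getD c.toNat 0 + cnt)).getD j 0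
          = if c.toNat = j then answer.getD j 0 + cnt else answer.getD j 0 := by
        simp only [List.getD_eq_getElem?_getD, List.getElem?_set]
        by_cases h : c.toNat = j
        · subst h
          rw [if_pos rfl, if_pos (by omega)]
          simp
        · rw [if_neg h, if_neg h]
      rw [hgd]
      by_cases h : c.toNat = j
      · have hcj : (j : Int) = c := by omega
        have hjncs : (j : Int) ∉ cs := by rw [hcj]; exact (List.nodup_cons.1 hnd).1
        rw [if_pos h, if_neg hjncs, if_pos (by rw [hcj]; exact List.mem_cons_self)]
        ring
      · have hcj : (j : Int) ≠ c := by omega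
        rw [if_neg h]
        by_cases hmem : (j : Int) ∈ cs
        · rw [if_pos hmem, if_pos (List.mem_cons_of_mem _ hmem)]
        · rw [if_neg hmem, if_neg (by
            intro hx
            rcases List.mem_cons.1 hx with h' | h'
            · exact hcj h'
            · exact hmem h')]

theorem addCols_eq_of_same_mem (cnt : Int) (cols1 cols2 : List Int) (answer : List Int)
    (hb : ∀ c ∈ cols1, 0 ≤ c ∧ c < (answer.length : Int))
    (hnd1 : cols1.Nodup) (hnd2 : cols2.Nodup)
    (hmem : ∀ c : Int, c ∈ cols1 ↔ c ∈ cols2) :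
    solA_addCols cnt answer cols1 = solA_addCols cnt answer cols2 := by
  have hb2 : ∀ c ∈ cols2, 0 ≤ c ∧ c < (answer.length : Int) := fun c hc => hb c ((hmem c).2 hc)
  obtain ⟨hl1, hv1⟩ := addCols_spec cnt cols1 answer hb hnd1
  obtain ⟨hl2, hv2⟩ := addCols_spec cnt cols2 answer hb2 hnd2
  apply List.ext_getElem (by rw [hl1, hl2])
  intro j hj1 hj2
  have hjlen : j < answer.length := by omega
  have e1 := hv1 j hjlen
  have e2 := hv2 j hjlen
  rw [List.getD_eq_getElem?_getD, List.getElem?_eq_getElem hj1, Option.getD_some] at e1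
  rw [List.getD_eq_getElem?_getD, List.getElem?_eq_getElem hj2, Option.getD_some] at e2
  rw [e1, e2, if_congr (hmem j) rfl rfl]

-- ---- outer loops ----

structure OutInv (land : List (List Int)) (N M : Int)
    (stA : List (List Int) × List Int) (stB : PySem.Set (Int × Int) × List Int) : Prop where
  shape : pvShape N.toNat M.toNat stA.1
  ans_eq : stA.2 = stB.2
  ans_len : stA.2.length = M.toNat
  mark : ∀ c : Int × Int, c ∈ stB.1 ↔ (pvInB N M c ∧ pvGet2 stA.1 c.1 c.2 ≠ 0)
  nodupB : stB.1.Nodup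

theorem inner_spec (land : List (List Int)) (N M : Int) (hN : 0 ≤ N) (hM : 0 ≤ M)
    (n : Int) (hn : 0 ≤ n ∧ n < N) :
    ∀ (ms : List Int) (stA : List (List Int) × List Int) (stB : PySem.Set (Int × Int) × List Int),
      (∀ m ∈ ms, 0 ≤ m ∧ m < M) →
      OutInv land N M stA stB →
      OutInv land N M (solA_inner land N M n ms stA)
        (solB_inner land N M (solB_oil land N M) n ms stB) := by
  intro ms
  induction ms with
  | nil =>
    intro stA stB hb hInv
    rw [solA_inner, solB_inner]
    exact hInv
  | cons m ms ihm =>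
    intro stA stB hbm hInv
    obtain ⟨hm0, hmM⟩ := hbm m List.mem_cons_self
    have hmb : pvInB N M (n, m) := ⟨hn.1, hn.2, hm0, hmM⟩
    have hoilc := oil_contains land N M (n, m)
    have husedc := PySem.Set.contains_iff stB.1 (n, m)
    rw [solA_inner, solB_inner]
    by_cases hg : pvGet2 stA.1 n m = 0 ∧ pvGet2 land n m ≠ 0
    · have hnotmemB : (n, m) ∉ stB.1 := by
        intro hmem
        obtain ⟨-, hne⟩ := (hInv.mark (n, m)).1 hmem
        exact hne hg.1
      have hcondB : ((solB_oil land N M).contains (n, m) && !(stB.1.contains (n, m))) = true := by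
        rw [Bool.and_eq_true, Bool.not_eq_eq_eq_not, Bool.not_true]
        refine ⟨hoilc.2 ⟨hmb, hg.2⟩, ?_⟩
        cases h : stB.1.contains (n, m)
        · rfl
        · exact absurd (husedc.1 h) hnotmemB
      rw [if_pos hg, if_pos hcondB]
      -- facts for this component
      have hfree : pvFree land N M stA.1 (n, m) := ⟨hmb, hg.2, hg.1⟩
      have hNN : ((N.toNat : Nat) : Int) = N := Int.toNat_of_nonneg hN
      have hMM : ((M.toNat : Nat) : Int) = M := Int.toNat_of_nonneg hM
      -- A side: BFS from the seed
      have hInvBfs : BfsInv land N M stA.1 (n, m) (pvSet2 stA.1 n m 1) [(n, m)] [] := by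
        refine ⟨pvShape_set2 stA.1 N.toNat M.toNat hInv.shape n m 1 hn.1 (by omega) hm0,
          ?_, by simp, ?_, by simp, by simp⟩
        · intro c hc
          obtain ⟨c1, c2, c3, c4⟩ := hc
          rw [pvGet2_set2 stA.1 N.toNat M.toNat hInv.shape n m 1 hn.1 (by omega) hm0 (by omega)
            c.1 c.2 c1 (by omega) c3 (by omega)]
          by_cases hcc : c = (n, m)
          · rw [if_pos (by rw [hcc]; exact ⟨rfl, rfl⟩)]
            simp [hcc]
          · rw [if_neg (by rintro ⟨e1, e2⟩; exact hcc (Prod.ext e1 e2))]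
            simp only [List.nil_append, List.mem_singleton]
            constructor
            · intro h; exact Or.inl h
            · rintro (h | h)
              · exact h
              · exact absurd h hcc
        · intro c hc
          simp only [List.nil_append, List.mem_singleton] at hc
          rw [hc]
          exact Relation.ReflTransGen.refl
      have hflip := pvZeros_flip stA.1 N M hN hM hInv.shape (n, m) hmb hg.1
      dsimp only at hflip
      have hcellsNM : (pvCells N M).length = (N * M).toNat := length_pvCells N M hN hM
      obtain ⟨usedF, Pf, heqA, hshF, hndF, hmemF, hmarkF⟩ :=
        bfs_spec land N M hN hM stA.1 (n, m) hfree ((N * M).toNat + 1)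
          (pvSet2 stA.1 n m 1) [(n, m)] [] hInvBfs (by
            have := pvZeros_le stA.1 N M
            simp only [List.length_singleton]
            omega)
      simp only [List.map_nil, List.length_nil, Nat.cast_zero] at heqA
      -- B side: saturation from the seed
      have hused : ∀ c : Int × Int, stB.1.contains c = true ↔
          (pvInB N M c ∧ pvGet2 stA.1 c.1 c.2 ≠ 0) := by
        intro c
        rw [PySem.Set.contains_iff]
        exact hInv.mark c
      have hsatPre : (PySem.Set.ofList [((n : Int), m)]).Nodup := by simp
      obtain ⟨hndC, hmemC⟩ :=
        sat_spec land N M stA.1 (solB_oil land N M) stB.1 (oil_contains land N M) hused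
          (n, m) hfree ((N * M).toNat) (PySem.Set.ofList [(n, m)]) (by simp) (by simp)
          (by
            intro c hc
            have : c = ((n : Int), m) := by simpa using hc
            rw [this]
            exact Relation.ReflTransGen.refl)
          (by
            have hof : PySem.Set.ofList [((n : Int), m)] = [(n, m)] := rfl
            rw [hof, hcellsNM]
            simp)
      -- the two components agree
      have heqA' : solA_bfs land N M ((N * M).toNat + 1) (pvSet2 stA.1 n m 1) [(n, m)]
          PySem.Set.empty 0
          = (usedF, PySem.Set.ofList (Pf.map Prod.snd), (Pf.length : Int)) := heqA
      simp only [heqA']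
      set compF := solB_sat (solB_oil land N M) stB.1 (N * M).toNat
        (PySem.Set.ofList [(n, m)]) with hcompF
      have hmemPfC : ∀ c : Int × Int, c ∈ Pf ↔ c ∈ compF := by
        intro c
        rw [hmemF c, hmemC c]
      have hperm : Pf.Perm compF := (List.perm_ext_iff_of_nodup hndF hndC).2 hmemPfC
      have hlenEq : Pf.length = compF.length := hperm.length_eq
      -- answers agree
      have hansA : solA_addCols (Pf.length : Int) stA.2 (PySem.Set.ofList (Pf.map Prod.snd))
          = solB_addCols (compF.length : Int) stB.2 (PySem.Set.ofList (compF.map Prod.snd)) := by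
        have hBA : solB_addCols = solA_addCols := rfl
        rw [hBA, ← hInv.ans_eq, ← hlenEq]
        refine addCols_eq_of_same_mem _ _ _ _ ?_ (PySem.Set.nodup_ofList _) (PySem.Set.nodup_ofList _) ?_
        · intro c hc
          rw [PySem.Set.mem_ofList] at hc
          obtain ⟨p, hp, rfl⟩ := List.mem_map.1 hc
          have hinB := pvReach_inB hfree ((hmemF p).1 hp)
          obtain ⟨-, -, h3, h4⟩ := hinB
          rw [hInv.ans_len]
          omega
        · intro c
          rw [PySem.Set.mem_ofList, PySem.Set.mem_ofList]
          constructor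
          · intro h
            obtain ⟨p, hp, rfl⟩ := List.mem_map.1 h
            exact List.mem_map.2 ⟨p, (hmemPfC p).1 hp, rfl⟩
          · intro h
            obtain ⟨p, hp, rfl⟩ := List.mem_map.1 h
            exact List.mem_map.2 ⟨p, (hmemPfC p).2 hp, rfl⟩
      -- new invariant
      refine ihm _ _ (fun d hd => hbm d (List.mem_cons_of_mem _ hd)) ?_
      refine ⟨hshF, ?_, ?_, ?_, ?_⟩
      · exact hansA
      · -- answer length preserved
        have hb1 : ∀ c ∈ (PySem.Set.ofList (Pf.map Prod.snd) : List Int),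
            0 ≤ c ∧ c < (stA.2.length : Int) := by
          intro c hc
          rw [PySem.Set.mem_ofList] at hc
          obtain ⟨p, hp, rfl⟩ := List.mem_map.1 hc
          have hinB := pvReach_inB hfree ((hmemF p).1 hp)
          obtain ⟨-, -, h3, h4⟩ := hinB
          rw [hInv.ans_len]
          omega
        have := (addCols_spec (Pf.length : Int) (PySem.Set.ofList (Pf.map Prod.snd)) stA.2 hb1
          (PySem.Set.nodup_ofList _)).1
        simpa [this] using hInv.ans_len
      · -- marks agree
        intro c
        rw [PySem.Set.mem_union]
        constructor
        · rintro (h | h)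
          · obtain ⟨hin, hne⟩ := (hInv.mark c).1 h
            exact ⟨hin, (hmarkF c hin).2 (Or.inl hne)⟩
          · have hr := (hmemC c).1 h
            have hin := pvReach_inB hfree hr
            exact ⟨hin, (hmarkF c hin).2 (Or.inr ((hmemF c).2 hr))⟩
        · rintro ⟨hin, hne⟩
          rcases (hmarkF c hin).1 hne with h | h
          · exact Or.inl ((hInv.mark c).2 ⟨hin, h⟩)
          · exact Or.inr ((hmemPfC c).1 h)
      · exact PySem.Set.nodup_union _ _ hInv.nodupB
    · have hcondB : ((solB_oil land N M).contains (n, m) && !(stB.1.contains (n, m))) ≠ true := by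
        intro hc
        rw [Bool.and_eq_true, Bool.not_eq_eq_eq_not, Bool.not_true] at hc
        obtain ⟨h1, h2⟩ := hc
        obtain ⟨-, hnz⟩ := hoilc.1 h1
        have hzz : pvGet2 stA.1 n m = 0 := by
          by_contra hne
          rw [husedc.2 ((hInv.mark (n, m)).2 ⟨hmb, hne⟩)] at h2
          cases h2
        exact hg ⟨hzz, hnz⟩
      rw [if_neg hg, if_neg hcondB]
      exact ihm _ _ (fun d hd => hbm d (List.mem_cons_of_mem _ hd)) hInv

theorem outer_spec (land : List (List Int)) (N M : Int) (hN : 0 ≤ N) (hM : 0 ≤ M) :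
    ∀ (ns : List Int) (stA : List (List Int) × List Int) (stB : PySem.Set (Int × Int) × List Int),
      (∀ n ∈ ns, 0 ≤ n ∧ n < N) →
      OutInv land N M stA stB →
      OutInv land N M (solA_outer land N M ns stA)
        (solB_outer land N M (solB_oil land N M) ns stB) := by
  intro ns
  induction ns with
  | nil =>
    intro stA stB hb hInv
    rw [solA_outer, solB_outer]
    exact hInv
  | cons n ns ihn =>
    intro stA stB hb hInv
    rw [solA_outer, solB_outer]
    refine ihn _ _ (fun d hd => hb d (List.mem_cons_of_mem _ hd)) ?_
    refine inner_spec land N M hN hM n (hb n List.mem_cons_self)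
      (PySem.List.pyRange 0 M 1) stA stB ?_ hInv
    intro m hm
    have := (PySem.List.mem_pyRange_one).1 hm
    exact ⟨this.1, this.2⟩

-- ===== VERDICT (by name: the statement is the Claim_ definition above) =====
theorem solution_spec : Claim_equal_solution := by
  unfold Claim_equal_solution
  intro land _hdom _hpre
  unfold Spec_solution solution solution_alt
  have hN : (0 : Int) ≤ (land.length : Int) := by omega
  have hM : (0 : Int) ≤ ((PySem.List.pyGetD land 0 ([] : List Int)).length : Int) := by omega
  have hInv0 : OutInv land (land.length : Int)
      ((PySem.List.pyGetD land 0 ([] : List Int)).length : Int)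
      (List.replicate (land.length : Int).toNat
        (List.replicate ((PySem.List.pyGetD land 0 ([] : List Int)).length : Int).toNat (0 : Int)),
        List.replicate ((PySem.List.pyGetD land 0 ([] : List Int)).length : Int).toNat (0 : Int))
      (PySem.Set.empty,
        List.replicate ((PySem.List.pyGetD land 0 ([] : List Int)).length : Int).toNat (0 : Int)) := by
    refine ⟨⟨by simp, ?_⟩, rfl, by simp, ?_, List.nodup_nil⟩
    · intro r hr
      rw [List.eq_of_mem_replicate hr]
      simp
    · intro c
      constructor
      · intro h
        exact absurd h (List.not_mem_nil)
      · rintro ⟨-, hne⟩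
        refine absurd (pvGet2_zeros _ ?_ c.1 c.2) hne
        intro r hr w hw
        rw [List.eq_of_mem_replicate hr] at hw
        exact List.eq_of_mem_replicate hw
  have hout := outer_spec land (land.length : Int)
    ((PySem.List.pyGetD land 0 ([] : List Int)).length : Int) hN hM
    (PySem.List.pyRange 0 (land.length : Int) 1) _ _
    (by
      intro n hn
      have := (PySem.List.mem_pyRange_one).1 hn
      exact ⟨this.1, this.2⟩)
    hInv0
  dsimp only
  rw [hout.ans_eq]
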